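-- pv_equiv track=rewrite | github.com/davidgedye/alife | soup_analyze.py | tape_str
-- ===== SOURCE A (Python) =====
-- BFF_OPS        = set(b'<>+-,[]')
--
-- def tok_char(t):
--     return int(t) & 0xFF
--
-- def tape_str(half_tape, mark_ops=True):
--     """Format a HALF_LEN token array as a string (op char or '.' for data)."""
--     chars = []
--     for t in half_tape:
--         ch = tok_char(t)
--         if mark_ops and ch in BFF_OPS:
--             chars.append(chr(ch))
--         else:
--             chars.append('.')
--     return ''.join(chars)
-- ===== SOURCE B (Python) =====
-- _OPS = b'<>+-,[]'
--
-- def tape_str(half_tape, mark_ops=True):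
--     """Format a HALF_LEN token array: start from an all-dots buffer, then for
--     each BFF op character scatter it into the positions holding that byte."""
--     data = [int(t) & 0xFF for t in half_tape]
--     out = ['.'] * len(data)
--     if mark_ops:
--         for op in _OPS:
--             for i, b in enumerate(data):
--                 if b == op:
--                     out[i] = chr(op)
--     return ''.join(out)
-- ===== Notes on version B (the rewrite author's own statement) =====
-- stated objective: alternative
-- what changed: Instead of a single pass with a set-membership branch building chars one by one, B first fills an all-dots buffer and then makes one scatter pass per op character, overwriting only the positions that hold that byte.
import Mathlib
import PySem

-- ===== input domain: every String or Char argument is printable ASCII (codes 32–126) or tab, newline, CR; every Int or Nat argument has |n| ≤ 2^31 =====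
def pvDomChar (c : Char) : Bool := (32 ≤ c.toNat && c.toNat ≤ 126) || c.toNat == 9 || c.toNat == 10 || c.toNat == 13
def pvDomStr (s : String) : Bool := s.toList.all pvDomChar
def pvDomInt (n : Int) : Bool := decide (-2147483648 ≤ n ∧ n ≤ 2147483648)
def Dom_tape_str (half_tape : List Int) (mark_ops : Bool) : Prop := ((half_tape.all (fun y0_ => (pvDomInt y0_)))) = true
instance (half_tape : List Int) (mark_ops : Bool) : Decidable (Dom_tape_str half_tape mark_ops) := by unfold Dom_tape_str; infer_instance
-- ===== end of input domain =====

-- B replaces the single pass with a membership branch by an all-dots buffer plus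
-- one scatter pass per op character (objective: alternative; not faster).
-- ===== PORT A =====
def bffOps : PySem.Set Int := PySem.Set.ofList [60, 62, 43, 45, 44, 91, 93]

def tok_char (t : Int) : Int := PySem.Int.band t 255

def tape_str (half_tape : List Int) (mark_ops : Bool) : String :=
  let chars : List Char := half_tape.foldl (fun acc t =>
    let ch := tok_char t
    if mark_ops ∧ ch ∈ bffOps then acc ++ [Char.ofNat ch.toNat] else acc ++ ['.']) []
  String.mk chars

-- ===== PORT B =====
def opsBytes : List Int := [60, 62, 43, 45, 44, 91, 93]

-- the inner 'for i, b in enumerate(data): if b == op: out[i] = chr(op)' pass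
def scatterPass (data : List Int) (op : Int) (out : List Char) : List Char :=
  data.zipIdx.foldl (fun out p =>
    if p.1 = op then out.set p.2 (Char.ofNat op.toNat) else out) out

def tape_str_alt (half_tape : List Int) (mark_ops : Bool) : String :=
  let data := half_tape.map (fun t => PySem.Int.band t 255)
  let out0 := List.replicate data.length '.'
  let out := if mark_ops then opsBytes.foldl (fun out op => scatterPass data op out) out0 else out0
  String.mk out

-- ===== PRECONDITION & SPEC =====
def Spec_tape_str (half_tape : List Int) (mark_ops : Bool) (out : String) : Prop := out = tape_str_alt half_tape mark_ops
instance (half_tape : List Int) (mark_ops : Bool) (out : String) : Decidable (Spec_tape_str half_tape mark_ops out) := by unfold Spec_tape_str; infer_instance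

-- ===== CLAIM (what is proved, stated in full; the proofs are below) =====
def Claim_equal_tape_str : Prop := ∀ (half_tape : List Int) (mark_ops : Bool), Dom_tape_str half_tape mark_ops → Spec_tape_str half_tape mark_ops (tape_str half_tape mark_ops)

-- ===== LEMMAS AND PROOFS =====
-- the scatter pass never changes the length
theorem scatterAux_length (pairs : List (Int × Nat)) (op : Int) (out : List Char) :
    (pairs.foldl (fun out p =>
      if p.1 = op then out.set p.2 (Char.ofNat op.toNat) else out) out).length = out.length := by
  induction pairs generalizing out with
  | nil => rfl
  | cons p l ih =>
    simp only [List.foldl_cons]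
    rw [ih]
    split_ifs <;> simp

-- pointwise characterisation of one scatter pass (generalised over the start index)
theorem scatterAux_get (l : List Int) (op : Int) (k : Nat) (out : List Char) (i : Nat)
    (hlen : k + l.length ≤ out.length) :
    ((l.zipIdx k).foldl (fun out p =>
      if p.1 = op then out.set p.2 (Char.ofNat op.toNat) else out) out)[i]? =
      if k ≤ i ∧ l[i - k]? = some op then some (Char.ofNat op.toNat) else out[i]? := by
  induction l generalizing k out with
  | nil => simp
  | cons a l ih =>
    simp only [List.zipIdx_cons, List.foldl_cons]
    rw [ih]
    · set out' := if a = op then out.set k (Char.ofNat op.toNat) else out with hout'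
      rcases Nat.lt_trichotomy i k with hik | hik | hik
      · -- i < k : untouched everywhere
        rw [if_neg (by omega), if_neg (by omega)]
        simp only [hout']
        split_ifs with ha
        · exact List.getElem?_set_ne (by omega)
        · rfl
      · -- i = k : the head decides
        subst hik
        rw [if_neg (by omega)]
        simp only [Nat.sub_self, List.getElem?_cons_zero]
        by_cases ha : a = op
        · rw [if_pos ⟨le_refl i, by simp [ha]⟩]
          simp only [hout', if_pos ha]
          rw [List.getElem?_set_self (by simp at hlen ⊢; omega)]
        · rw [if_neg (by simp [ha])]
          simp [hout', ha]
      · -- i > k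
        have h1 : i - k = (i - (k + 1)) + 1 := by omega
        rw [h1, List.getElem?_cons_succ]
        by_cases hc : k + 1 ≤ i ∧ l[i - (k + 1)]? = some op
        · rw [if_pos hc, if_pos ⟨by omega, hc.2⟩]
        · rw [if_neg hc, if_neg (by intro h; exact hc ⟨by omega, h.2⟩)]
          simp only [hout']
          split_ifs with ha
          · exact List.getElem?_set_ne (by omega)
          · rfl
    · split_ifs <;> simp at hlen ⊢ <;> omega

theorem scatterPass_length (data : List Int) (op : Int) (out : List Char) :
    (scatterPass data op out).length = out.length := scatterAux_length _ _ _

theorem scatterPass_get (data : List Int) (op : Int) (out : List Char) (i : Nat)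
    (hlen : data.length ≤ out.length) :
    (scatterPass data op out)[i]? =
      if data[i]? = some op then some (Char.ofNat op.toNat) else out[i]? := by
  unfold scatterPass
  rw [scatterAux_get data op 0 out i (by omega)]
  simp

-- characterisation of the fold over the op list
theorem opsFold_get (L : List Int) (data : List Int) (out : List Char) (i : Nat)
    (hlen : out.length = data.length) :
    (L.foldl (fun out op => scatterPass data op out) out)[i]? =
      match data[i]? with
      | some b => if b ∈ L then some (Char.ofNat b.toNat) else out[i]?
      | none => out[i]? := by
  induction L generalizing out with
  | nil => cases data[i]? <;> simp
  | cons op L ih =>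
    simp only [List.foldl_cons]
    rw [ih _ (by rw [scatterPass_length, hlen])]
    rw [scatterPass_get data op out i (by omega)]
    cases hd : data[i]? with
    | none => simp
    | some b =>
      by_cases hbo : b = op
      · subst hbo; simp
      · simp [List.mem_cons, hbo]

theorem mem_bffOps_iff (b : Int) : b ∈ bffOps ↔ b ∈ opsBytes := by
  simp [bffOps, opsBytes, PySem.Set.mem_ofList]

theorem tape_str_spec : Claim_equal_tape_str := by
  intro half_tape mark_ops _
  unfold Spec_tape_str tape_str tape_str_alt
  have hfun : (fun (acc : List Char) (t : Int) =>
      if mark_ops = true ∧ tok_char t ∈ bffOps then acc ++ [Char.ofNat (tok_char t).toNat]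
      else acc ++ ['.']) =
      fun acc t => acc ++ [if mark_ops = true ∧ tok_char t ∈ bffOps
        then Char.ofNat (tok_char t).toNat else '.'] := by
    funext acc t; split_ifs <;> rfl
  simp only [hfun, PySem.List.foldl_append_singleton_eq_map, List.nil_append]
  set data := half_tape.map (fun t => PySem.Int.band t 255) with hdata
  set out0 := List.replicate data.length '.' with hout0
  have hlen0 : out0.length = data.length := by simp [hout0]
  cases mark_ops with
  | false =>
    simp only [Bool.false_eq_true, false_and, if_false]
    congr 1
    apply List.ext_getElem?
    intro i
    rw [hout0, List.getElem?_replicate, List.getElem?_map, hdata, List.length_map]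
    cases hh : half_tape[i]? with
    | none =>
      have := List.getElem?_eq_none_iff.mp hh
      rw [if_neg (by omega)]
      rfl
    | some t =>
      have := (List.getElem?_eq_some_iff.mp hh).1
      rw [if_pos this]
      rfl
  | true =>
    simp only [true_and, if_pos]
    congr 1
    apply List.ext_getElem?
    intro i
    rw [opsFold_get opsBytes data out0 i hlen0]
    cases hh : half_tape[i]? with
    | none =>
      have hd : data[i]? = none := by simp [hdata, hh]
      have hm : (half_tape.map (fun t => if tok_char t ∈ bffOps then Char.ofNat (tok_char t).toNat else '.'))[i]? = none := by simp [hh]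
      have ho : out0[i]? = none := by
        rw [List.getElem?_eq_none]
        rw [hlen0]
        simpa [hdata] using List.getElem?_eq_none_iff.mp hh
      simp [hd, hm, ho]
    | some t =>
      have hilt : i < half_tape.length := (List.getElem?_eq_some_iff.mp hh).1
      have hd : data[i]? = some (PySem.Int.band t 255) := by simp [hdata, hh]
      have hm : (half_tape.map (fun t => if tok_char t ∈ bffOps then Char.ofNat (tok_char t).toNat else '.'))[i]? =
          some (if tok_char t ∈ bffOps then Char.ofNat (tok_char t).toNat else '.') := by simp [hh]
      have ho : out0[i]? = some '.' := by
        rw [hout0, List.getElem?_replicate, if_pos (by simpa [hdata] using hilt)]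
      rw [hd, hm, ho]
      simp only [tok_char]
      by_cases hb : PySem.Int.band t 255 ∈ opsBytes
      · rw [if_pos hb, if_pos ((mem_bffOps_iff _).mpr hb)]
      · rw [if_neg hb, if_neg (fun h => hb ((mem_bffOps_iff _).mp h))]
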